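-- pv_equiv track=rewrite | github.com/PrzybyszB/Scheduler | backend/api/services/trip_detail.py | process_stop_times
-- ===== SOURCE A (Python) =====
-- def process_stop_times(stop_times_csv, routes):
--     """
--     Add stop times to routes based on trip_id.
--     """
--     for stop_time in stop_times_csv:
--         trip_id = stop_time['trip_id']
--         stop_id = stop_time['stop_id']
--         if trip_id in routes:
--             routes[trip_id]['stops_detail'].append({
--                 'stop_id': stop_id,
--             })
--     return routes
-- ===== SOURCE B (Python) =====
-- def process_stop_times(stop_times_csv, routes):
--     """
--     Add stop times to routes based on trip_id.
--     Builds a trip_id -> [stop_id, ...] index in one pass over stop_times_csv,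
--     then traverses the routes, extending each route's stops_detail with its
--     indexed stops (mutates routes in place, like the original).
--     """
--     grouped = {}
--     for stop_time in stop_times_csv:
--         grouped.setdefault(stop_time['trip_id'], []).append(stop_time['stop_id'])
--     for trip_id, route in routes.items():
--         stops = grouped.get(trip_id)
--         if stops:
--             route['stops_detail'].extend({'stop_id': s} for s in stops)
--     return routes
-- ===== Notes on version B (the rewrite author's own statement) =====
-- stated objective: alternative
-- what changed: Instead of scanning stop_times and appending into routes one match at a time, B first builds a trip_id->stop_ids index in one pass over stop_times_csv and then iterates over routes, extending each matched route's stops_detail with all its stops at once (traversal direction flipped, index table interposed).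
import Mathlib
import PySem

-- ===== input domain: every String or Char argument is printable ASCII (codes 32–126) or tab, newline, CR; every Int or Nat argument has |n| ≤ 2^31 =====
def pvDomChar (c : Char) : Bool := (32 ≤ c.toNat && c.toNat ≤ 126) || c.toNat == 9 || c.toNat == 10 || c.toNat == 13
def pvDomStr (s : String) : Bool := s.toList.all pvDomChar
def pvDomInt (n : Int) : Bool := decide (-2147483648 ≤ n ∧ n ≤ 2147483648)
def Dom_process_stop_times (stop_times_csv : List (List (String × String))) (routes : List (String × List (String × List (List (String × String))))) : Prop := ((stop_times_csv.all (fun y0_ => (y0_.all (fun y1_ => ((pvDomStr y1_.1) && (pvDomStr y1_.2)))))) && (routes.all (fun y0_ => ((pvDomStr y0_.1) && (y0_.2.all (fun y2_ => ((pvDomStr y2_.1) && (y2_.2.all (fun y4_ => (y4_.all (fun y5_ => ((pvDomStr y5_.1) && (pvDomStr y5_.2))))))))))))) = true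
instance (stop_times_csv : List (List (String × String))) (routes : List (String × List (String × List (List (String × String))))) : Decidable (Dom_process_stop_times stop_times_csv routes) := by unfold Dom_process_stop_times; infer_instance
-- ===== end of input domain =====

-- B replaces A's per-stop append-into-routes scan by a trip_id→stops index built in one pass,
-- then one traversal of routes (alternative decomposition; return value only — both Pythons
-- mutate `routes` in place identically).


-- Shared dict primitives on association lists (Python dict: first/unique-key semantics).
-- d[k] lookup (first match):
def pvGet? {α : Type} (d : List (String × α)) (k : String) : Option α :=
  match d with
  | [] => none
  | (k', v) :: rest => if k' = k then some v else pvGet? rest k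

-- in-place update of the value at key k (no-op if absent):
def pvModify {α : Type} (d : List (String × α)) (k : String) (f : α → α) : List (String × α) :=
  match d with
  | [] => []
  | (k', v) :: rest => if k' = k then (k', f v) :: rest else (k', v) :: pvModify rest k f

-- ===== PORT A =====
-- loop body: trip_id = st['trip_id']; stop_id = st['stop_id']; if trip_id in routes: append
def pvStepA (rs : List (String × List (String × List (List (String × String)))))
    (st : List (String × String)) : List (String × List (String × List (List (String × String)))) :=
  match pvGet? st "trip_id", pvGet? st "stop_id" with
  | some trip_id, some stop_id =>
      if (pvGet? rs trip_id).isSome then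
        pvModify rs trip_id (fun route =>
          pvModify route "stops_detail" (fun sd => sd ++ [[("stop_id", stop_id)]]))
      else rs
  | _, _ => rs  -- KeyError in Python: excluded by Pre_

def process_stop_times (stop_times_csv : List (List (String × String))) (routes : List (String × List (String × List (List (String × String))))) : List (String × List (String × List (List (String × String)))) :=
  stop_times_csv.foldl pvStepA routes

-- ===== PORT B =====
-- grouped.setdefault(st['trip_id'], []).append(st['stop_id'])
def pvGroupStep (g : List (String × List String)) (st : List (String × String)) : List (String × List String) :=
  match pvGet? st "trip_id", pvGet? st "stop_id" with
  | some trip_id, some stop_id =>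
      match pvGet? g trip_id with
      | some _ => pvModify g trip_id (fun l => l ++ [stop_id])
      | none => g ++ [(trip_id, [stop_id])]
  | _, _ => g  -- KeyError in Python: excluded by Pre_

def process_stop_times_alt (stop_times_csv : List (List (String × String))) (routes : List (String × List (String × List (List (String × String))))) : List (String × List (String × List (List (String × String)))) :=
  let grouped := stop_times_csv.foldl pvGroupStep []
  -- stops = grouped.get(trip_id); if stops: … — every stored list is nonempty, so
  -- `if stops:` is exactly the `some` case of the lookup.
  routes.map (fun p =>
    match pvGet? grouped p.1 with
    | some stops => (p.1, pvModify p.2 "stops_detail"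
        (fun sd => sd ++ stops.map (fun s => [("stop_id", s)])))
    | none => p)

-- ===== PRECONDITION & SPEC =====
-- Pre_ excludes (a) association lists with duplicate keys at any dict level — those are not
-- representable as the Python dicts A and B actually receive — and (b) inputs where A raises
-- KeyError: a stop_time missing 'trip_id' or 'stop_id', or a matched route missing 'stops_detail'.
def Pre_process_stop_times (stop_times_csv : List (List (String × String))) (routes : List (String × List (String × List (List (String × String))))) : Prop :=
  (∀ st ∈ stop_times_csv, (st.map Prod.fst).Nodup ∧
      "trip_id" ∈ st.map Prod.fst ∧ "stop_id" ∈ st.map Prod.fst) ∧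
  (routes.map Prod.fst).Nodup ∧
  (∀ p ∈ routes, (p.2.map Prod.fst).Nodup ∧
      ∀ q ∈ p.2, ∀ e ∈ q.2, (e.map Prod.fst).Nodup) ∧
  (∀ st ∈ stop_times_csv, ∀ p ∈ routes, ("trip_id", p.1) ∈ st → "stops_detail" ∈ p.2.map Prod.fst)
instance (stop_times_csv : List (List (String × String))) (routes : List (String × List (String × List (List (String × String))))) : Decidable (Pre_process_stop_times stop_times_csv routes) := by
  unfold Pre_process_stop_times
  haveI h1 : DecidableEq (List (List (String × String))) := fun x y => by infer_instance
  haveI h2 : DecidableEq (List (String × List (List (String × String)))) := fun x y => by infer_instance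
  infer_instance

def pvWitness_process_stop_times : (List (List (String × String))) × (List (String × List (String × List (List (String × String))))) :=
  ([[("trip_id", "t1"), ("stop_id", "s1")]], [("t1", [("stops_detail", [])]), ("t2", [("stops_detail", [[("stop_id", "s0")]])])])

def Spec_process_stop_times (stop_times_csv : List (List (String × String))) (routes : List (String × List (String × List (List (String × String))))) (out : List (String × List (String × List (List (String × String))))) : Prop := out = process_stop_times_alt stop_times_csv routes
instance (stop_times_csv : List (List (String × String))) (routes : List (String × List (String × List (List (String × String))))) (out : List (String × List (String × List (List (String × String))))) : Decidable (Spec_process_stop_times stop_times_csv routes out) := by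
  unfold Spec_process_stop_times
  haveI h1 : DecidableEq (List (List (String × String))) := fun x y => by infer_instance
  haveI h2 : DecidableEq (List (String × List (List (String × String)))) := fun x y => by infer_instance
  haveI h3 : DecidableEq (List (String × List (String × List (List (String × String))))) := fun x y => by infer_instance
  exact h3 out (process_stop_times_alt stop_times_csv routes)

-- ===== CLAIM (what is proved, stated in full; the proofs are below) =====
def Claim_equal_process_stop_times : Prop := ∀ (stop_times_csv : List (List (String × String))) (routes : List (String × List (String × List (List (String × String))))), Dom_process_stop_times stop_times_csv routes → Pre_process_stop_times stop_times_csv routes → Spec_process_stop_times stop_times_csv routes (process_stop_times stop_times_csv routes)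

-- ===== LEMMAS AND PROOFS =====

-- stops of trip k, in encounter order
def pvG (sts : List (List (String × String))) (k : String) : List String :=
  sts.filterMap (fun st =>
    match pvGet? st "trip_id", pvGet? st "stop_id" with
    | some t, some s => if t = k then some s else none
    | _, _ => none)

-- the per-route rewriting B performs, abstracted over the index function
def pvF (f : String → List String) (p : String × List (String × List (List (String × String)))) :
    String × List (String × List (List (String × String))) :=
  if f p.1 = [] then p
  else (p.1, pvModify p.2 "stops_detail" (fun sd => sd ++ (f p.1).map (fun s => [("stop_id", s)])))

theorem pvGet?_pvModify {α : Type} (d : List (String × α)) (k k' : String) (f : α → α) :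
    pvGet? (pvModify d k f) k' = if k' = k then (pvGet? d k).map f else pvGet? d k' := by
  induction d with
  | nil => simp [pvGet?, pvModify]
  | cons hd tl ih =>
    obtain ⟨k0, v⟩ := hd
    by_cases h0 : k0 = k
    · subst h0
      by_cases h1 : k' = k0
      · subst h1; simp [pvGet?, pvModify]
      · simp [pvGet?, pvModify, h1, show ¬ k0 = k' from fun h => h1 h.symm]
    · by_cases h1 : k0 = k'
      · subst h1
        simp [pvGet?, pvModify, h0]
      · simp [pvGet?, pvModify, h0, h1, ih]

theorem pvGet?_append_single {α : Type} (d : List (String × α)) (t k : String) (v : α) :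
    pvGet? (d ++ [(t, v)]) k =
      match pvGet? d k with
      | some w => some w
      | none => if t = k then some v else none := by
  induction d with
  | nil => simp [pvGet?]
  | cons hd tl ih =>
    obtain ⟨k0, w⟩ := hd
    by_cases h0 : k0 = k <;> simp [pvGet?, h0, ih]

theorem mapFst_pvModify {α : Type} (d : List (String × α)) (k : String) (f : α → α) :
    (pvModify d k f).map Prod.fst = d.map Prod.fst := by
  induction d with
  | nil => rfl
  | cons hd tl ih =>
    obtain ⟨k0, v⟩ := hd
    by_cases h0 : k0 = k <;> simp [pvModify, h0, ih]

theorem pvModify_pvModify {α : Type} (d : List (String × α)) (k : String) (f g : α → α) :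
    pvModify (pvModify d k f) k g = pvModify d k (fun x => g (f x)) := by
  induction d with
  | nil => rfl
  | cons hd tl ih =>
    obtain ⟨k0, v⟩ := hd
    by_cases h0 : k0 = k <;> simp [pvModify, h0, ih]

theorem pvGet?_eq_none_iff {α : Type} (d : List (String × α)) (k : String) :
    pvGet? d k = none ↔ ∀ p ∈ d, p.1 ≠ k := by
  induction d with
  | nil => simp [pvGet?]
  | cons hd tl ih =>
    obtain ⟨k0, v⟩ := hd
    by_cases h0 : k0 = k <;> simp [pvGet?, h0, ih]

theorem pvGet?_isSome_of_mem {α : Type} (d : List (String × α)) (k : String)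
    (h : k ∈ d.map Prod.fst) : (pvGet? d k).isSome := by
  rcases hg : pvGet? d k with _ | v
  · obtain ⟨p, hp, hpk⟩ := List.mem_map.mp h
    exact absurd hpk ((pvGet?_eq_none_iff d k).mp hg p hp)
  · rfl

theorem pvG_cons (st : List (String × String)) (rest : List (List (String × String)))
    (tid sid k : String)
    (h1 : pvGet? st "trip_id" = some tid) (h2 : pvGet? st "stop_id" = some sid) :
    pvG (st :: rest) k = if tid = k then sid :: pvG rest k else pvG rest k := by
  by_cases hk : tid = k <;> simp [pvG, h1, h2, hk]

-- characterisation of the grouped index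
theorem grouped_get (sts : List (List (String × String))) (g0 : List (String × List String)) (k : String) :
    pvGet? (sts.foldl pvGroupStep g0) k =
      match pvGet? g0 k with
      | some l => some (l ++ pvG sts k)
      | none => if pvG sts k = [] then none else some (pvG sts k) := by
  induction sts generalizing g0 with
  | nil =>
    simp only [List.foldl_nil, pvG, List.filterMap_nil]
    cases pvGet? g0 k <;> simp
  | cons st rest ih =>
    rw [List.foldl_cons, ih]
    rcases h1 : pvGet? st "trip_id" with _ | tid
    · have hG : pvG (st :: rest) k = pvG rest k := by
        simp [pvG, h1]
      have hstep : pvGroupStep g0 st = g0 := by simp [pvGroupStep, h1]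
      rw [hG, hstep]
    · rcases h2 : pvGet? st "stop_id" with _ | sid
      · have hG : pvG (st :: rest) k = pvG rest k := by
          simp [pvG, h1, h2]
        have hstep : pvGroupStep g0 st = g0 := by simp [pvGroupStep, h1, h2]
        rw [hG, hstep]
      · rw [pvG_cons st rest tid sid k h1 h2]
        have hstep : pvGroupStep g0 st =
            match pvGet? g0 tid with
            | some _ => pvModify g0 tid (fun l => l ++ [sid])
            | none => g0 ++ [(tid, [sid])] := by
          simp [pvGroupStep, h1, h2]
        rw [hstep]
        rcases hg : pvGet? g0 tid with _ | l
        · -- fresh key: appended at the end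
          rw [pvGet?_append_single]
          by_cases hk : tid = k
          · subst hk; rw [hg]; simp
          · have hk' : ¬ k = tid := fun h => hk h.symm
            cases hgk : pvGet? g0 k <;> simp [hk]
        · -- existing key: value extended in place
          rw [pvGet?_pvModify]
          by_cases hk : k = tid
          · subst hk; simp [hg]
          · have hk' : ¬ tid = k := fun h => hk h.symm
            simp [hk, hk']

theorem step_commute (f : String → List String) (tid sid : String)
    (routes : List (String × List (String × List (List (String × String)))))
    (hnd : (routes.map Prod.fst).Nodup) :
    routes.map (pvF (fun k => if k = tid then sid :: f k else f k)) =
      (if (pvGet? routes tid).isSome then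
        pvModify routes tid (fun route =>
          pvModify route "stops_detail" (fun sd => sd ++ [[("stop_id", sid)]]))
       else routes).map (pvF f) := by
  induction routes with
  | nil => simp [pvGet?]
  | cons hd tl ih =>
    obtain ⟨k, r⟩ := hd
    simp only [List.map_cons, List.nodup_cons] at hnd ⊢
    by_cases hk : k = tid
    · subst hk
      have hget : pvGet? ((k, r) :: tl) k = some r := by simp [pvGet?]
      rw [hget]
      simp only [Option.isSome_some, if_pos]
      have hmod : pvModify ((k, r) :: tl) k
          (fun route => pvModify route "stops_detail" (fun sd => sd ++ [[("stop_id", sid)]])) =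
          (k, pvModify r "stops_detail" (fun sd => sd ++ [[("stop_id", sid)]])) :: tl := by
        simp [pvModify]
      rw [hmod, List.map_cons]
      congr 1
      · -- head entry
        have hfn : (fun sd => sd ++ (sid :: f k).map (fun s => [("stop_id", s)])) =
            (fun sd : List (List (String × String)) =>
              (sd ++ [[("stop_id", sid)]]) ++ (f k).map (fun s => [("stop_id", s)])) := by
          funext sd; simp
        by_cases he : f k = []
        · simp [pvF, he]
        · simp only [pvF, he, reduceIte, List.map_cons]
          rw [pvModify_pvModify]
          simp
      · -- tail: no further occurrence of k
        apply List.map_congr_left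
        intro p hp
        have hne : p.1 ≠ k := by
          intro h
          exact hnd.1 (h ▸ List.mem_map_of_mem hp)
        simp [pvF, hne]
    · have hget : pvGet? ((k, r) :: tl) tid = pvGet? tl tid := by simp [pvGet?, hk]
      have hmod : pvModify ((k, r) :: tl) tid
          (fun route => pvModify route "stops_detail" (fun sd => sd ++ [[("stop_id", sid)]])) =
          (k, r) :: pvModify tl tid
            (fun route => pvModify route "stops_detail" (fun sd => sd ++ [[("stop_id", sid)]])) := by
        simp [pvModify, hk]
      rw [hget, hmod]
      have hhd : pvF (fun k' => if k' = tid then sid :: f k' else f k') (k, r) = pvF f (k, r) := by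
        simp [pvF, hk]
      rw [ih hnd.2]
      split_ifs <;> simp [hhd]

theorem foldA_eq (sts : List (List (String × String)))
    (routes : List (String × List (String × List (List (String × String)))))
    (hnd : (routes.map Prod.fst).Nodup)
    (hkeys : ∀ st ∈ sts, (pvGet? st "trip_id").isSome ∧ (pvGet? st "stop_id").isSome) :
    sts.foldl pvStepA routes = routes.map (pvF (pvG sts)) := by
  induction sts generalizing routes with
  | nil =>
    rw [List.foldl_nil]
    have h : ∀ p ∈ routes, pvF (pvG []) p = id p := by
      intro p hp; simp [pvF, pvG]
    rw [List.map_congr_left h, List.map_id]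
  | cons st rest ih =>
    obtain ⟨h1s, h2s⟩ := hkeys st List.mem_cons_self
    obtain ⟨tid, h1⟩ := Option.isSome_iff_exists.mp h1s
    obtain ⟨sid, h2⟩ := Option.isSome_iff_exists.mp h2s
    have hstep : pvStepA routes st =
        if (pvGet? routes tid).isSome then
          pvModify routes tid (fun route =>
            pvModify route "stops_detail" (fun sd => sd ++ [[("stop_id", sid)]]))
        else routes := by
      simp [pvStepA, h1, h2]
    have hnd' : ((pvStepA routes st).map Prod.fst).Nodup := by
      rw [hstep]; split_ifs
      · rw [mapFst_pvModify]; exact hnd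
      · exact hnd
    rw [List.foldl_cons,
        ih (pvStepA routes st) hnd' (fun s hs => hkeys s (List.mem_cons_of_mem _ hs)),
        hstep, ← step_commute (pvG rest) tid sid routes hnd]
    apply List.map_congr_left
    intro p hp
    obtain ⟨pk, pr⟩ := p
    simp only [pvF]
    rw [pvG_cons st rest tid sid pk h1 h2]
    by_cases hk : tid = pk
    · subst hk; simp
    · simp [hk, show ¬ pk = tid from fun h => hk h.symm]

theorem alt_eq (sts : List (List (String × String)))
    (routes : List (String × List (String × List (List (String × String))))) :
    process_stop_times_alt sts routes = routes.map (pvF (pvG sts)) := by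
  unfold process_stop_times_alt
  apply List.map_congr_left
  intro p hp
  have hg := grouped_get sts [] p.1
  simp only [pvGet?] at hg
  by_cases he : pvG sts p.1 = []
  · rw [he] at hg; simp only [reduceIte] at hg
    simp [hg, pvF, he]
  · simp only [if_neg he] at hg
    simp [hg, pvF, he]

-- ===== VERDICT (by name: the statement is the Claim_ definition above) =====
theorem process_stop_times_spec : Claim_equal_process_stop_times := by
  intro sts routes _ hpre
  unfold Spec_process_stop_times
  rw [alt_eq]
  exact foldA_eq sts routes hpre.2.1 (fun st hst =>
    ⟨pvGet?_isSome_of_mem st "trip_id" (hpre.1 st hst).2.1,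
     pvGet?_isSome_of_mem st "stop_id" (hpre.1 st hst).2.2⟩)
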